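-- pv_equiv track=rewrite | github.com/hojoon123/PythonAlgorithems | 03.수학/240315/27172_수 나누기 게임.py | solve
-- ===== SOURCE A (Python) =====
-- def solve(n, graph, max_n, score):
--     for i in range(n):
--         idx, num = graph[i]
--
--         for target in range(num * 2, max_n + 1, num):
--             if target in score:
--                 score[num] += 1
--                 score[target] -= 1
--     return score
-- ===== SOURCE B (Python) =====
-- def solve(n, graph, max_n, score):
--     cnt = {}
--     for idx, num in graph[:max(0, n)]:
--         cnt[num] = cnt.get(num, 0) + 1
--     for num, c in cnt.items():
--         for t in list(score):
--             if 2 * num <= t <= max_n and t % num == 0: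
--                 score[num] += c
--                 score[t] -= c
--     return score
-- ===== Notes on version B (the rewrite author's own statement) =====
-- stated objective: alternative
-- what changed: B counts the multiplicity of each num among the first n graph entries once, then for each distinct num scans score's keys with a direct divisibility/range test, instead of A's per-entry sieve over every multiple of num up to max_n; Pre_ restricts the first n nums to positive integers (the game's natural domain), excluding non-positive nums where A's value is an artefact of Python range()'s negative-step semantics.
-- outside the precondition, e.g. on solve(1, [(0, -2)], 0, {-2: 0, -4: 0}): A returns {-2: 0, -4: 0}, B returns {-2: 1, -4: -1}
import Mathlib
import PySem

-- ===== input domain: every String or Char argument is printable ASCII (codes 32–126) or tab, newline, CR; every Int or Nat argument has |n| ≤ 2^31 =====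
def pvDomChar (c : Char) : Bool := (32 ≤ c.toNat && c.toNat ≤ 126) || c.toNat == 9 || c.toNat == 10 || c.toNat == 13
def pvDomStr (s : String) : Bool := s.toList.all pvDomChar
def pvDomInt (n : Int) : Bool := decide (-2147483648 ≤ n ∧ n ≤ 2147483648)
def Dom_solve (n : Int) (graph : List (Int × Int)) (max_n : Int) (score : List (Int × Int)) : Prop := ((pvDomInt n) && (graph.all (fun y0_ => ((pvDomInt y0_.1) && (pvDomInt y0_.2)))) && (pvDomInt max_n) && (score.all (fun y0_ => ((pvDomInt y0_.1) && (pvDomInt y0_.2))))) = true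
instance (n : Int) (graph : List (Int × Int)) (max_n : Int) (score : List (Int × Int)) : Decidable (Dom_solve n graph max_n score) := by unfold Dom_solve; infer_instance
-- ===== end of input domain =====

-- B replaces A's sieve over the multiples of each num by a counting pass over the first n
-- graph entries followed by one scan of score's keys per distinct num, testing the
-- divisibility/range condition directly; equivalence is about the RETURN value (both
-- Pythons also mutate the score dict in place).

-- ===== PORT A =====
def solve (n : Int) (graph : List (Int × Int)) (max_n : Int) (score : List (Int × Int)) : List (Int × Int) :=
  ((PySem.List.pyRange 0 n 1).foldl
    (fun d i =>
      let num := (PySem.List.pyGetD graph i (0, 0)).2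
      (PySem.List.pyRange (num * 2) (max_n + 1) num).foldl
        (fun d' target =>
          if d'.contains target then
            (d'.modify num 0 (· + 1)).modify target 0 (· - 1)
          else d') d)
    (PySem.Dict.mk score)).items

-- ===== PORT B =====
-- Source B's inner test: 2 * num <= t <= max_n and t % num == 0
def hitsB (num t max_n : Int) : Bool :=
  decide (2 * num ≤ t) && decide (t ≤ max_n) && (PySem.Int.mod t num == 0)

def solve_alt (n : Int) (graph : List (Int × Int)) (max_n : Int) (score : List (Int × Int)) : List (Int × Int) :=
  -- cnt = {}; for idx, num in graph[:max(0, n)]: cnt[num] = cnt.get(num, 0) + 1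
  let cnt := PySem.Dict.counter ((PySem.List.slice graph none (some (max 0 n))).map (fun p => p.2))
  -- for num, c in cnt.items(): for t in list(score): if 2*num <= t <= max_n and t % num == 0: score[num] += c; score[t] -= c
  (cnt.items.foldl
    (fun d p =>
      d.keys.foldl
        (fun d' t =>
          if hitsB p.1 t max_n then (d'.modify p.1 0 (· + p.2)).modify t 0 (· - p.2) else d') d)
    (PySem.Dict.mk score)).items

-- ===== PRECONDITION & SPEC =====
-- Pre_solve requires: n ≤ len(graph) (else A raises IndexError); score's keys distinct (it
-- is a Python dict); every num among the first n entries is POSITIVE — the game's natural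
-- domain (num = 0 makes A raise ValueError on range's zero step; negative num is outside
-- the divisor game and A's value there is an artefact of range()'s negative-step
-- semantics); and whenever some key of score is a proper multiple of such a num within
-- max_n, num itself is a key of score (else A raises KeyError on score[num] += 1).
def Pre_solve (n : Int) (graph : List (Int × Int)) (max_n : Int) (score : List (Int × Int)) : Prop :=
  n ≤ (graph.length : Int) ∧
  (score.map (fun q => q.1)).Nodup ∧
  ∀ p ∈ graph.take n.toNat, 0 < p.2 ∧
    ((∃ q ∈ score, hitsB p.2 q.1 max_n = true) → p.2 ∈ score.map (fun q => q.1))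
instance (n : Int) (graph : List (Int × Int)) (max_n : Int) (score : List (Int × Int)) : Decidable (Pre_solve n graph max_n score) := by unfold Pre_solve; infer_instance

def pvWitness_solve : Int × (List (Int × Int)) × Int × (List (Int × Int)) :=
  (1, [(0, 2)], 4, [(2, 0), (4, 0)])

def Spec_solve (n : Int) (graph : List (Int × Int)) (max_n : Int) (score : List (Int × Int)) (out : List (Int × Int)) : Prop := out = solve_alt n graph max_n score
instance (n : Int) (graph : List (Int × Int)) (max_n : Int) (score : List (Int × Int)) (out : List (Int × Int)) : Decidable (Spec_solve n graph max_n score out) := by unfold Spec_solve; infer_instance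

-- ===== CLAIM (what is proved, stated in full; the proofs are below) =====
def Claim_equal_solve : Prop := ∀ (n : Int) (graph : List (Int × Int)) (max_n : Int) (score : List (Int × Int)), Dom_solve n graph max_n score → Pre_solve n graph max_n score → Spec_solve n graph max_n score (solve n graph max_n score)

-- ===== LEMMAS AND PROOFS =====

-- one combined update score[num] += c; score[t] -= c, pointwise on the values
theorem getD_upd (d : PySem.Dict Int Int) (num t c k : Int) (hne : num ≠ t) :
    ((d.modify num 0 (· + c)).modify t 0 (· - c)).getD k 0 =
      d.getD k 0 + (if k = num then c else 0) - (if k = t then c else 0) := by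
  simp only [PySem.Dict.getD_modify]
  split_ifs <;> simp_all

theorem keys_upd (d : PySem.Dict Int Int) (num t : Int) (c : Int)
    (hn : num ∈ d.keys) (ht : t ∈ d.keys) :
    ((d.modify num 0 (· + c)).modify t 0 (· - c)).keys = d.keys := by
  have h1 : (d.modify num 0 (· + c)).keys = d.keys := by
    rw [PySem.Dict.keys_modify, PySem.Dict.keys_insert_of_contains _ _
      ((PySem.Dict.contains_iff_mem_keys _ _).2 hn)]
  rw [PySem.Dict.keys_modify, PySem.Dict.keys_insert_of_contains _ _
      ((PySem.Dict.contains_iff_mem_keys _ _).2 (by rw [h1]; exact ht)), h1]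

-- B's inner loop after filtering: an unconditional run of updates over targets L
theorem foldUpdAll (num c : Int) (L : List Int) : ∀ (d : PySem.Dict Int Int) (K : List Int),
    d.keys = K → (∀ t ∈ L, t ∈ K) → num ∉ L → (L ≠ [] → num ∈ K) →
    (L.foldl (fun d' t => (d'.modify num 0 (· + c)).modify t 0 (· - c)) d).keys = K ∧
    ∀ k, (L.foldl (fun d' t => (d'.modify num 0 (· + c)).modify t 0 (· - c)) d).getD k 0 =
      d.getD k 0 + (L.length : Int) * (if k = num then c else 0) - (L.count k : Int) * c := by
  induction L with
  | nil => intro d K hK _ _ _; simpa using hK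
  | cons t L ih =>
    intro d K hK hsub hnum hmem
    have hmemK : num ∈ K := hmem (by simp)
    have htK : t ∈ K := hsub t (by simp)
    have hne : num ≠ t := fun h => hnum (h ▸ List.mem_cons_self ..)
    have hk1 : ((d.modify num 0 (· + c)).modify t 0 (· - c)).keys = K := by
      rw [keys_upd d num t c (hK ▸ hmemK) (hK ▸ htK), hK]
    obtain ⟨hks, hvals⟩ := ih ((d.modify num 0 (· + c)).modify t 0 (· - c)) K hk1
      (fun t' ht' => hsub t' (List.mem_cons_of_mem _ ht'))
      (fun h => hnum (List.mem_cons_of_mem _ h)) (fun _ => hmemK)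
    refine ⟨hks, fun k => ?_⟩
    rw [List.foldl_cons] at *
    rw [hvals k, getD_upd d num t c k hne]
    simp only [List.length_cons, List.count_cons]
    push_cast
    split_ifs <;> simp_all <;> ring

-- A's inner loop: guarded by the current dict's key set, which stays K throughout
theorem foldA (num : Int) (L : List Int) : ∀ (d : PySem.Dict Int Int) (K : List Int),
    d.keys = K → num ∉ L → (num ∈ K ∨ ∀ t ∈ L, t ∉ K) →
    (L.foldl (fun d' t => if d'.contains t then (d'.modify num 0 (· + 1)).modify t 0 (· - 1) else d') d).keys = K ∧
    ∀ k, (L.foldl (fun d' t => if d'.contains t then (d'.modify num 0 (· + 1)).modify t 0 (· - 1) else d') d).getD k 0 =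
      d.getD k 0 + ((L.filter (fun t => decide (t ∈ K))).length : Int) * (if k = num then 1 else 0)
        - ((L.filter (fun t => decide (t ∈ K))).count k : Int) := by
  induction L with
  | nil => intro d K hK _ _; simpa using hK
  | cons t L ih =>
    intro d K hK hnum hmem
    have hne : num ≠ t := fun h => hnum (h ▸ List.mem_cons_self ..)
    have hnum' : num ∉ L := fun h => hnum (List.mem_cons_of_mem _ h)
    have hmem' : num ∈ K ∨ ∀ t' ∈ L, t' ∉ K := by
      rcases hmem with h | h
      · exact Or.inl h
      · exact Or.inr fun t' ht' => h t' (List.mem_cons_of_mem _ ht')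
    by_cases htK : t ∈ K
    · have hmemK : num ∈ K := by
        rcases hmem with h | h
        · exact h
        · exact absurd htK (h t (by simp))
      have hcont : d.contains t = true := (PySem.Dict.contains_iff_mem_keys _ _).2 (hK ▸ htK)
      have hk1 : ((d.modify num 0 (· + 1)).modify t 0 (· - 1)).keys = K := by
        rw [keys_upd d num t 1 (hK ▸ hmemK) (hK ▸ htK), hK]
      obtain ⟨hks, hvals⟩ := ih ((d.modify num 0 (· + 1)).modify t 0 (· - 1)) K hk1 hnum' hmem'
      refine ⟨by simpa [hcont] using hks, fun k => ?_⟩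
      rw [List.foldl_cons, if_pos hcont]
      rw [hvals k, getD_upd d num t 1 k hne]
      simp only [List.filter_cons, htK, decide_true, if_true, List.length_cons, List.count_cons]
      push_cast
      split_ifs <;> simp_all <;> ring
    · have hcont : d.contains t = false := by
        rw [PySem.Dict.contains_eq_decide_mem_keys, hK]; simpa using htK
      obtain ⟨hks, hvals⟩ := ih d K hK hnum' hmem'
      refine ⟨by simpa [hcont] using hks, fun k => ?_⟩
      rw [List.foldl_cons, if_neg (by simp [hcont])]
      rw [hvals k]
      simp [htK]

theorem nodup_pyRange (a b s : Int) (hs : s ≠ 0) : (PySem.List.pyRange a b s).Nodup := by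
  rcases lt_or_gt_of_ne hs with h | h
  · rw [PySem.List.pyRange_of_neg a b h]
    exact List.nodup_range.map fun x y hxy => by
      have : s * x = s * y := by omega
      exact_mod_cast mul_left_cancel₀ hs this
  · rw [PySem.List.pyRange_of_pos a b h]
    exact List.nodup_range.map fun x y hxy => by
      have : s * x = s * y := by omega
      exact_mod_cast mul_left_cancel₀ hs this

theorem mem_pyRange_iff_hits (num t mx : Int) (hnum : 0 < num) :
    t ∈ PySem.List.pyRange (num * 2) (mx + 1) num ↔ hitsB num t mx = true := by
  have hdvd : num ∣ t - num * 2 ↔ num ∣ t := by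
    constructor
    · intro h; have := dvd_add h (Dvd.intro 2 rfl); simpa using this
    · intro h; exact dvd_sub h (Dvd.intro 2 rfl)
  rw [PySem.List.mem_pyRange_iff_of_pos hnum]
  simp only [hitsB, Bool.and_eq_true, decide_eq_true_eq,
    beq_iff_eq, PySem.Int.mod_eq_zero_iff_dvd, hdvd]
  constructor
  · rintro ⟨h1, h2, h3⟩; exact ⟨⟨by omega, by omega⟩, h3⟩
  · rintro ⟨⟨h1, h2⟩, h3⟩; exact ⟨by omega, by omega, h3⟩

theorem hits_ne_num (num t mx : Int) (hnum : 0 < num) (h : hitsB num t mx = true) : t ≠ num := by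
  unfold hitsB at h
  simp only [Bool.and_eq_true, decide_eq_true_eq] at h
  omega

-- per-key contribution of one num (as Int): #hit keys if k = num, minus 1 if k is hit
def contrib (K : List Int) (mx k num : Int) : Int :=
  ((K.filter (fun t => hitsB num t mx)).length : Int) * (if k = num then 1 else 0)
    - ((K.filter (fun t => hitsB num t mx)).count k : Int)

theorem filter_perm (num mx : Int) (K : List Int) (hnum : 0 < num) (hK : K.Nodup) :
    ((PySem.List.pyRange (num * 2) (mx + 1) num).filter (fun t => decide (t ∈ K))).Perm
      (K.filter (fun t => hitsB num t mx)) := by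
  rw [List.perm_ext_iff_of_nodup (List.Nodup.filter _ (nodup_pyRange _ _ _ (by omega)))
    (List.Nodup.filter _ hK)]
  intro x
  simp only [List.mem_filter, decide_eq_true_eq]
  rw [mem_pyRange_iff_hits _ _ _ hnum]
  tauto

-- A's outer loop over the first n graph entries
theorem outerA (mx : Int) (es : List (Int × Int)) : ∀ (d : PySem.Dict Int Int) (K : List Int),
    d.keys = K → K.Nodup →
    (∀ p ∈ es, 0 < p.2 ∧ ((∃ t ∈ K, hitsB p.2 t mx = true) → p.2 ∈ K)) →
    (es.foldl (fun d p =>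
        (PySem.List.pyRange (p.2 * 2) (mx + 1) p.2).foldl
          (fun d' t => if d'.contains t then (d'.modify p.2 0 (· + 1)).modify t 0 (· - 1) else d') d) d).keys = K ∧
    ∀ k, (es.foldl (fun d p =>
        (PySem.List.pyRange (p.2 * 2) (mx + 1) p.2).foldl
          (fun d' t => if d'.contains t then (d'.modify p.2 0 (· + 1)).modify t 0 (· - 1) else d') d) d).getD k 0 =
      d.getD k 0 + (es.map (fun p => contrib K mx k p.2)).sum := by
  induction es with
  | nil => intro d K hK _ _; simpa using hK
  | cons p es ih =>
    intro d K hK hnd hpre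
    obtain ⟨hnum0, himp⟩ := hpre p (by simp)
    have hnumL : p.2 ∉ PySem.List.pyRange (p.2 * 2) (mx + 1) p.2 := fun h =>
      hits_ne_num p.2 p.2 mx hnum0 ((mem_pyRange_iff_hits _ _ _ hnum0).1 h) rfl
    have hmem : p.2 ∈ K ∨ ∀ t ∈ PySem.List.pyRange (p.2 * 2) (mx + 1) p.2, t ∉ K := by
      by_cases hex : ∃ t ∈ K, hitsB p.2 t mx = true
      · exact Or.inl (himp hex)
      · refine Or.inr fun t htL htK => hex ⟨t, htK, (mem_pyRange_iff_hits _ _ _ hnum0).1 htL⟩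
    obtain ⟨hks, hvals⟩ := foldA p.2 _ d K hK hnumL hmem
    obtain ⟨hks2, hvals2⟩ := ih _ K hks hnd (fun q hq => hpre q (List.mem_cons_of_mem _ hq))
    refine ⟨hks2, fun k => ?_⟩
    rw [List.foldl_cons] at *
    rw [hvals2 k, hvals k]
    have hperm := filter_perm p.2 mx K hnum0 hnd
    rw [List.map_cons, List.sum_cons, contrib, hperm.length_eq, hperm.count_eq]
    ring

-- B's outer loop over the counter's items
theorem outerB (mx : Int) (its : List (Int × Int)) : ∀ (d : PySem.Dict Int Int) (K : List Int),
    d.keys = K → K.Nodup →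
    (∀ p ∈ its, 0 < p.1 ∧ ((∃ t ∈ K, hitsB p.1 t mx = true) → p.1 ∈ K)) →
    (its.foldl (fun d p =>
        d.keys.foldl (fun d' t =>
          if hitsB p.1 t mx then (d'.modify p.1 0 (· + p.2)).modify t 0 (· - p.2) else d') d) d).keys = K ∧
    ∀ k, (its.foldl (fun d p =>
        d.keys.foldl (fun d' t =>
          if hitsB p.1 t mx then (d'.modify p.1 0 (· + p.2)).modify t 0 (· - p.2) else d') d) d).getD k 0 =
      d.getD k 0 + (its.map (fun p => p.2 * contrib K mx k p.1)).sum := by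
  induction its with
  | nil => intro d K hK _ _; simpa using hK
  | cons p its ih =>
    intro d K hK hnd hpre
    obtain ⟨hnum0, himp⟩ := hpre p (by simp)
    have hstep : d.keys.foldl (fun d' t =>
          if hitsB p.1 t mx then (d'.modify p.1 0 (· + p.2)).modify t 0 (· - p.2) else d') d
        = (K.filter (fun t => hitsB p.1 t mx)).foldl
            (fun d' t => (d'.modify p.1 0 (· + p.2)).modify t 0 (· - p.2)) d := by
      rw [hK, PySem.List.foldl_if_eq_foldl_filter]
    obtain ⟨hks, hvals⟩ := foldUpdAll p.1 p.2 (K.filter (fun t => hitsB p.1 t mx)) d K hK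
      (fun t ht => (List.mem_filter.1 ht).1)
      (fun h => hits_ne_num p.1 p.1 mx hnum0 (by simpa using (List.mem_filter.1 h).2) rfl)
      (fun hne => himp (by
        rcases List.exists_mem_of_ne_nil _ hne with ⟨t, ht⟩
        exact ⟨t, (List.mem_filter.1 ht).1, (List.mem_filter.1 ht).2⟩))
    obtain ⟨hks2, hvals2⟩ := ih _ K hks hnd (fun q hq => hpre q (List.mem_cons_of_mem _ hq))
    refine ⟨?_, fun k => ?_⟩
    · rw [List.foldl_cons, hstep]; exact hks2
    · rw [List.foldl_cons, hstep, hvals2 k, hvals k, List.map_cons, List.sum_cons]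
      simp only [contrib]
      split_ifs <;> ring

-- grouping by value: summing c * g(num) over Counter(nums).items() is summing g over nums
theorem counter_sum (nums : List Int) (g : Int → Int) :
    (((PySem.Dict.counter nums).items).map (fun p => p.2 * g p.1)).sum = (nums.map g).sum := by
  rw [PySem.Dict.items_counter, List.map_map]
  have hto : (PySem.Set.ofList nums).toFinset = nums.toFinset := by
    ext x; simp [PySem.Set.mem_ofList]
  rw [← List.sum_toFinset _ (PySem.Set.nodup_ofList nums), hto,
      Finset.sum_list_map_count]
  refine Finset.sum_congr rfl fun m _ => ?_
  simp

-- A's indexing loop is a loop over the first n entries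
theorem indexA (n : Int) (graph : List (Int × Int)) (hn : n ≤ (graph.length : Int))
    (f : PySem.Dict Int Int → (Int × Int) → PySem.Dict Int Int) (init : PySem.Dict Int Int) :
    (PySem.List.pyRange 0 n 1).foldl (fun d i => f d (PySem.List.pyGetD graph i (0, 0))) init =
      (graph.take n.toNat).foldl f init := by
  rcases le_or_gt n 0 with h | h
  · rw [PySem.List.pyRange_one_eq_nil h]
    have : n.toNat = 0 := by omega
    simp [this]
  · set xs := graph.take n.toNat with hxs
    have hlen : (PySem.List.len xs : Int) = n := by
      simp [PySem.List.len, hxs, List.length_take]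
      omega
    have step1 : (PySem.List.pyRange 0 n 1).foldl (fun d i => f d (PySem.List.pyGetD graph i (0, 0))) init
        = (PySem.List.pyRange 0 n 1).foldl (fun d i => f d (PySem.List.pyGetD xs i (0, 0))) init := by
      refine PySem.List.foldl_congr_mem _ _ _ _ (fun acc i hi => ?_)
      rw [PySem.List.mem_pyRange_one] at hi
      congr 1
      rw [PySem.List.pyGetD_of_nonneg _ _ hi.1, PySem.List.pyGetD_of_nonneg _ _ hi.1]
      have hxlen : xs.length = n.toNat := by rw [hxs]; simp [List.length_take]; omega
      have hlt : i.toNat < n.toNat := by omega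
      have hlt2 : i.toNat < graph.length := by omega
      rw [List.getD_eq_getElem _ _ hlt2, List.getD_eq_getElem _ _ (show i.toNat < xs.length by omega)]
      simp [hxs, List.getElem_take]
    rw [step1, ← hlen, PySem.List.foldl_pyRange_zero_pyGetD xs (0,0) f init]

-- graph[:max(0, n)] is the first n entries
theorem sliceB (n : Int) (graph : List (Int × Int)) :
    PySem.List.slice graph none (some (max 0 n)) = graph.take n.toNat := by
  rw [PySem.List.slice_to graph (le_max_left 0 n)]
  congr 1
  omega

-- ===== VERDICT (by name: the statement is the Claim_ definition above) =====
theorem solve_spec : Claim_equal_solve := by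
  intro n graph max_n score _hdom hpre
  obtain ⟨hn, hnd, hps⟩ := hpre
  unfold Spec_solve
  set K : List Int := score.map (fun q => q.1) with hKdef
  set es : List (Int × Int) := graph.take n.toNat with hes
  set nums : List Int := es.map (fun p => p.2) with hnums
  have hK0 : (PySem.Dict.mk score).keys = K := PySem.Dict.keys_mk score
  have hmemK : ∀ x : Int, x ∈ K ↔ ∃ q ∈ score, q.1 = x := by
    intro x; rw [hKdef]; simp [List.mem_map]
  have hpreA : ∀ p ∈ es, 0 < p.2 ∧ ((∃ t ∈ K, hitsB p.2 t max_n = true) → p.2 ∈ K) := by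
    intro p hp
    obtain ⟨h0, himp⟩ := hps p hp
    refine ⟨h0, fun ⟨t, htK, hh⟩ => himp ?_⟩
    obtain ⟨q, hq, hq1⟩ := (hmemK t).1 htK
    exact ⟨q, hq, by rw [hq1]; exact hh⟩
  have hA : solve n graph max_n score =
      ((es.foldl (fun d p =>
        (PySem.List.pyRange (p.2 * 2) (max_n + 1) p.2).foldl
          (fun d' t => if d'.contains t then (d'.modify p.2 0 (· + 1)).modify t 0 (· - 1) else d') d)
        (PySem.Dict.mk score))).items :=
    congrArg PySem.Dict.items (indexA n graph hn
      (fun d p => (PySem.List.pyRange (p.2 * 2) (max_n + 1) p.2).foldl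
        (fun d' t => if d'.contains t then (d'.modify p.2 0 (· + 1)).modify t 0 (· - 1) else d') d)
      (PySem.Dict.mk score))
  have hB : solve_alt n graph max_n score =
      (((PySem.Dict.counter nums).items).foldl (fun d p =>
        d.keys.foldl (fun d' t =>
          if hitsB p.1 t max_n then (d'.modify p.1 0 (· + p.2)).modify t 0 (· - p.2) else d') d)
        (PySem.Dict.mk score)).items := by
    unfold solve_alt
    rw [sliceB n graph]
  have hpreB : ∀ p ∈ (PySem.Dict.counter nums).items,
      0 < p.1 ∧ ((∃ t ∈ K, hitsB p.1 t max_n = true) → p.1 ∈ K) := by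
    intro p hp
    rw [PySem.Dict.items_counter, List.mem_map] at hp
    obtain ⟨m, hm, hpm⟩ := hp
    have hmn : m ∈ nums := (PySem.Set.mem_ofList nums m).1 hm
    rw [hnums, List.mem_map] at hmn
    obtain ⟨q, hq, hq2⟩ := hmn
    have := hpreA q hq
    rw [← hpm]
    simpa [hq2] using this
  obtain ⟨hksA, hvalsA⟩ := outerA max_n es (PySem.Dict.mk score) K hK0
    (by rw [hKdef] at hnd ⊢; exact hnd) hpreA
  obtain ⟨hksB, hvalsB⟩ := outerB max_n ((PySem.Dict.counter nums).items) (PySem.Dict.mk score) K hK0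
    (by rw [hKdef] at hnd ⊢; exact hnd) hpreB
  rw [hA, hB]
  rw [PySem.Dict.items_eq_map_keys _ (by rw [hksA]; exact hnd) 0,
      PySem.Dict.items_eq_map_keys _ (by rw [hksB]; exact hnd) 0,
      hksA, hksB]
  refine List.map_congr_left fun k hk => ?_
  rw [hvalsA k, hvalsB k, counter_sum nums (contrib K max_n k), hnums, List.map_map]
  rfl
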